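-- pv_equiv track=rewrite | github.com/AjayJakhar97/PythonCourse | Later/Day24 - Project/14-Find K Pairs with Smallest Sums.py | MyFunc_GetNumbers_SmallestSum
-- ===== SOURCE A (Python) =====
-- def MyFunc_GetNumbers_SmallestSum(num1, num2, k):
--     counter = 1
--     result = []
--
--     for i in num1:
--         for j in num2:
--             if counter <= k:
--                 result.append([i, j])
--                 counter += 1
--     return result
-- ===== SOURCE B (Python) =====
-- def MyFunc_GetNumbers_SmallestSum(num1, num2, k):
--     n = len(num2)
--     total = len(num1) * n
--     t = min(k, total)
--     return [[num1[idx // n], num2[idx % n]] for idx in range(t)]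
-- ===== Notes on version B (the rewrite author's own statement) =====
-- stated objective: faster
-- what changed: Replaces the nested loops over the whole Cartesian product (which keep iterating after k pairs are collected) by a single flat loop over min(k, total) linear indices decoded with // and %.
import Mathlib
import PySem

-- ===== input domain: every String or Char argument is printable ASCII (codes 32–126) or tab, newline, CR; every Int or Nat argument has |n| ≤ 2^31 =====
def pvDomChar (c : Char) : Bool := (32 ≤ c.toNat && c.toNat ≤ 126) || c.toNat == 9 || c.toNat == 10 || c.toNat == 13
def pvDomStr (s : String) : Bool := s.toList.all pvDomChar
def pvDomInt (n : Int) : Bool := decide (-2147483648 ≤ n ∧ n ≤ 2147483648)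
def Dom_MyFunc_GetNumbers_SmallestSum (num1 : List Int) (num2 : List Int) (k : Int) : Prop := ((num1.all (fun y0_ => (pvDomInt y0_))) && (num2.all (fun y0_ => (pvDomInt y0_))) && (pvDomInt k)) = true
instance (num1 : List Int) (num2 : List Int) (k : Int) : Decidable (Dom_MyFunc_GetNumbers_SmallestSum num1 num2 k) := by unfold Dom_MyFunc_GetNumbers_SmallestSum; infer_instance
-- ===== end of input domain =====

-- B replaces A's full nested scan of the Cartesian product by one flat loop over
-- min(k, total) linear indices decoded with // and % (faster: stops after k pairs).

-- ===== PORT A =====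
def MyFunc_GetNumbers_SmallestSum (num1 : List Int) (num2 : List Int) (k : Int) : List (List Int) :=
  (num1.foldl (fun st i =>
      num2.foldl (fun st j =>
        if st.1 ≤ k then (st.1 + 1, st.2 ++ [[i, j]]) else st) st)
    ((1 : Int), ([] : List (List Int)))).2

-- ===== PORT B =====
-- .getD 0 is exact: every idx < min k total decodes to in-range indices, so pyGet? is some.
def MyFunc_GetNumbers_SmallestSum_alt (num1 : List Int) (num2 : List Int) (k : Int) : List (List Int) :=
  let n : Int := num2.length
  let total : Int := num1.length * n
  let t : Int := min k total
  (PySem.List.pyRange 0 t 1).map (fun idx =>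
    [(PySem.List.pyGet? num1 (PySem.Int.floordiv idx n)).getD 0,
     (PySem.List.pyGet? num2 (PySem.Int.mod idx n)).getD 0])

-- ===== PRECONDITION & SPEC =====
def Spec_MyFunc_GetNumbers_SmallestSum (num1 : List Int) (num2 : List Int) (k : Int) (out : List (List Int)) : Prop := out = MyFunc_GetNumbers_SmallestSum_alt num1 num2 k
instance (num1 : List Int) (num2 : List Int) (k : Int) (out : List (List Int)) : Decidable (Spec_MyFunc_GetNumbers_SmallestSum num1 num2 k out) := by unfold Spec_MyFunc_GetNumbers_SmallestSum; infer_instance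

-- ===== CLAIM (what is proved, stated in full; the proofs are below) =====
def Claim_equal_MyFunc_GetNumbers_SmallestSum : Prop := ∀ (num1 : List Int) (num2 : List Int) (k : Int), Dom_MyFunc_GetNumbers_SmallestSum num1 num2 k → Spec_MyFunc_GetNumbers_SmallestSum num1 num2 k (MyFunc_GetNumbers_SmallestSum num1 num2 k)

-- ===== LEMMAS AND PROOFS =====

/-- The full row-major Cartesian product, as a list of two-element lists. -/
def pvPairs (num1 num2 : List Int) : List (List Int) :=
  num1.flatMap (fun i => num2.map (fun j => [i, j]))

lemma pvPairs_length (num1 num2 : List Int) :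
    (pvPairs num1 num2).length = num1.length * num2.length := by
  induction num1 with
  | nil => simp [pvPairs]
  | cons a l ih =>
    simp only [pvPairs, List.flatMap_cons, List.length_append, List.length_map,
      List.length_cons] at *
    rw [ih]; ring

/-- Inner loop of A: appending while the counter stays ≤ k is a `take`. -/
lemma pvInner (k : Int) (f : Int → List Int) (js : List Int) :
    ∀ (r : List (List Int)),
      js.foldl (fun st j => if st.1 ≤ k then (st.1 + 1, st.2 ++ [f j]) else st)
        ((r.length : Int) + 1, r)
      = (((r ++ (js.map f).take (k.toNat - r.length)).length : Int) + 1,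
          r ++ (js.map f).take (k.toNat - r.length)) := by
  induction js with
  | nil => intro r; simp
  | cons j js ih =>
    intro r
    by_cases h : (r.length : Int) + 1 ≤ k
    · have hk : r.length < k.toNat := by omega
      have h1 : ((r.length : Int) + 1, r).1 ≤ k := h
      simp only [List.foldl_cons, if_pos h1]
      have : ((r.length : Int) + 1 + 1, r ++ [f j])
          = (((r ++ [f j]).length : Int) + 1, r ++ [f j]) := by
        simp
      rw [this, ih (r ++ [f j])]
      have ht : k.toNat - r.length = (k.toNat - (r ++ [f j]).length) + 1 := by
        simp; omega
      simp only [List.map_cons, ht, List.take_succ_cons, List.append_assoc,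
        List.singleton_append]
    · have hk : k.toNat - r.length = 0 := by omega
      have h1 : ¬ ((r.length : Int) + 1, r).1 ≤ k := h
      simp only [List.foldl_cons, if_neg h1]
      rw [ih r]
      simp [hk]

/-- Outer loop of A over `is`, with pairs accumulated so far in `r`. -/
lemma pvOuter (k : Int) (num2 : List Int) (is : List Int) :
    ∀ (r : List (List Int)),
      is.foldl (fun st i =>
          num2.foldl (fun st j => if st.1 ≤ k then (st.1 + 1, st.2 ++ [[i, j]]) else st) st)
        ((r.length : Int) + 1, r)
      = (((r ++ (pvPairs is num2).take (k.toNat - r.length)).length : Int) + 1,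
          r ++ (pvPairs is num2).take (k.toNat - r.length)) := by
  induction is with
  | nil => intro r; simp [pvPairs]
  | cons a l ih =>
    intro r
    simp only [List.foldl_cons]
    rw [pvInner k (fun j => [a, j]) num2 r, ih]
    have heq : (r ++ (num2.map (fun j => [a, j])).take (k.toNat - r.length))
        ++ (pvPairs l num2).take
            (k.toNat - (r ++ (num2.map (fun j => [a, j])).take (k.toNat - r.length)).length)
        = r ++ (pvPairs (a :: l) num2).take (k.toNat - r.length) := by
      rw [List.append_assoc]
      congr 1
      have hl : (r ++ (num2.map (fun j => [a, j])).take (k.toNat - r.length)).length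
          = r.length + min (k.toNat - r.length) num2.length := by simp
      rw [hl]
      simp only [pvPairs, List.flatMap_cons]
      rw [List.take_append]
      congr 2
      simp only [List.length_map]
      omega
    rw [heq]

lemma pvA_eq_take (num1 num2 : List Int) (k : Int) :
    MyFunc_GetNumbers_SmallestSum num1 num2 k = (pvPairs num1 num2).take k.toNat := by
  unfold MyFunc_GetNumbers_SmallestSum
  have h0 : ((1 : Int), ([] : List (List Int)))
      = ((((List.nil : List (List Int)).length : Int)) + 1, ([] : List (List Int))) := by simp
  rw [h0, pvOuter k num2 num1 []]
  simp

/-- Flat-index decoding: the i-th pair of the row-major product. -/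
lemma pvPairs_getElem? (num2 : List Int) :
    ∀ (num1 : List Int) (i : Nat), i < num1.length * num2.length →
      (pvPairs num1 num2)[i]?
        = some [(num1[i / num2.length]?).getD 0, (num2[i % num2.length]?).getD 0] := by
  intro num1
  induction num1 with
  | nil => intro i hi; simp at hi
  | cons a l ih =>
    intro i hi
    have hn : 0 < num2.length := by
      by_contra h
      simp only [Nat.not_lt, Nat.le_zero] at h
      rw [h, Nat.mul_zero] at hi
      exact absurd hi (Nat.not_lt_zero _)
    simp only [pvPairs, List.flatMap_cons]
    by_cases h : i < num2.length
    · rw [List.getElem?_append_left (by simpa using h)]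
      have hdiv : i / num2.length = 0 := Nat.div_eq_of_lt h
      have hmod : i % num2.length = i := Nat.mod_eq_of_lt h
      rw [hdiv, hmod]
      simp [List.getElem?_map, List.getElem?_eq_getElem h]
    · push_neg at h
      rw [List.getElem?_append_right (by simpa using h)]
      have hlt : i - num2.length < l.length * num2.length := by
        have h2 : (a :: l).length * num2.length = l.length * num2.length + num2.length := by
          simp [List.length_cons, Nat.succ_mul]
        omega
      have := ih (i - num2.length) hlt
      simp only [pvPairs] at this
      simp only [List.length_map]
      rw [this]
      have hdiv : i / num2.length = (i - num2.length) / num2.length + 1 :=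
        Nat.div_eq_sub_div hn h
      have hmod : i % num2.length = (i - num2.length) % num2.length :=
        Nat.mod_eq_sub_mod h
      rw [hdiv, hmod]
      simp

lemma pvB_eq_take (num1 num2 : List Int) (k : Int) :
    MyFunc_GetNumbers_SmallestSum_alt num1 num2 k
      = (pvPairs num1 num2).take (min k ((num1.length : Int) * num2.length)).toNat := by
  unfold MyFunc_GetNumbers_SmallestSum_alt
  simp only [PySem.List.pyRange_one, sub_zero, List.map_map]
  set T : Nat := (min k ((num1.length : Int) * num2.length)).toNat with hT
  have hcast : ((num1.length : Int) * num2.length) = ((num1.length * num2.length : Nat) : Int) := by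
    push_cast; ring
  have hTle : T ≤ num1.length * num2.length := by
    have h1 := min_le_right k ((num1.length : Int) * num2.length)
    rw [hcast] at h1 hT
    omega
  apply List.ext_getElem?
  intro i
  by_cases hiT : i < T
  · have hi : i < num1.length * num2.length := by omega
    rw [List.getElem?_take_of_lt hiT]
    rw [pvPairs_getElem? num2 num1 i hi]
    rw [List.getElem?_map, List.getElem?_range hiT]
    simp only [Option.map_some, Function.comp_apply, zero_add]
    rw [PySem.Int.floordiv_natCast, PySem.Int.mod_natCast,
        PySem.List.pyGet?_natCast, PySem.List.pyGet?_natCast]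
  · rw [List.getElem?_eq_none (by simpa using (by omega : T ≤ i))]
    rw [List.getElem?_eq_none (by simp [List.length_take]; omega)]

-- ===== VERDICT (by name: the statement is the Claim_ definition above) =====
theorem MyFunc_GetNumbers_SmallestSum_spec : Claim_equal_MyFunc_GetNumbers_SmallestSum := by
  intro num1 num2 k _
  unfold Spec_MyFunc_GetNumbers_SmallestSum
  rw [pvA_eq_take, pvB_eq_take]
  have hlen := pvPairs_length num1 num2
  have hcast : ((num1.length : Int) * num2.length) = ((num1.length * num2.length : Nat) : Int) := by
    push_cast; ring
  by_cases h : k ≤ (num1.length : Int) * num2.length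
  · rw [min_eq_left h]
  · rw [min_eq_right (le_of_lt (lt_of_not_ge h))]
    rw [hcast] at h
    rw [List.take_of_length_le (by omega), List.take_of_length_le (by omega)]
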